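-- pv_equiv track=rewrite | github.com/shuoyangd/neural-tuning | utils/heuristics.py | get_nearest_src_align
-- ===== SOURCE A (Python) =====
-- def get_nearest_src_align(ta2sa, idx):
--   assert idx not in ta2sa
--   for dist in range(1,100):
--     for d in [+1, -1]:
--       idx_d_dist = idx + (dist * d)
--       if idx_d_dist in ta2sa and len(ta2sa[idx_d_dist]) == 1:
--         #if target word is aligned to just one source word
--         return ta2sa[idx_d_dist][0]
--       elif idx_d_dist in ta2sa and len(ta2sa[idx_d_dist]) > 1:
--         #if target word is aligned to many source words, pick the middle alignment
--         _s = sorted(ta2sa[idx_d_dist])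
--         return _s[int(len(_s)/2)]
--       else:
--         pass
-- ===== SOURCE B (Python) =====
-- def get_nearest_src_align(ta2sa, idx):
--   assert idx not in ta2sa
--   best = None  # (key_rank, alignment_list); key_rank = (abs(diff), 0 if diff > 0 else 1)
--   for k, al in ta2sa.items():
--     if al:
--       diff = k - idx
--       ad = abs(diff)
--       if 1 <= ad <= 99:
--         cand = (ad, 0 if diff > 0 else 1)
--         if best is None or cand < best[0]:
--           best = (cand, al)
--   if best is None:
--     return None
--   al = best[1]
--   if len(al) == 1:
--     return al[0]
--   s = sorted(al)
--   return s[len(s) // 2]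
-- ===== Notes on version B (the rewrite author's own statement) =====
-- stated objective: alternative
-- what changed: Instead of probing idx+-dist outward for dist=1..99 with up to 198 dict lookups, B makes a single pass over the dict items keeping the binding whose key minimises (abs(k-idx), 0 if k-idx>0 else 1), then extracts the element from that binding.
-- outside the precondition, e.g. on get_nearest_src_align({1: [2]}, 1): A raises AssertionError, B raises AssertionError
import Mathlib
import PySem

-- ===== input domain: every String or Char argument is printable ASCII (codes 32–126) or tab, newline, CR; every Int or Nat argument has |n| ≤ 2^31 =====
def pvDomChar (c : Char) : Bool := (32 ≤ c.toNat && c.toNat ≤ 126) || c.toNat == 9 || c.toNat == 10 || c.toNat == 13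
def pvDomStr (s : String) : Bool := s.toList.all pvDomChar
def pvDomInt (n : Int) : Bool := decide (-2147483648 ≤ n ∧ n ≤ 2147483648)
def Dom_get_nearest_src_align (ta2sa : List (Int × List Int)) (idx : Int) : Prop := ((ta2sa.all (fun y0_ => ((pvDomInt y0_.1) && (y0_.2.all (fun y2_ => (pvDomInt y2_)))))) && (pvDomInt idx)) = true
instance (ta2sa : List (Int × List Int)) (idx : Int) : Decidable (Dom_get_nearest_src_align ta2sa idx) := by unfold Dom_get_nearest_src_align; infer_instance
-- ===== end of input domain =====

-- B replaces A's outward probing of idx±dist (dist = 1..99) by a single pass over the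
-- association list keeping the nearest aligned key ((|k-idx|, +side-first) minimal): alternative, not faster.


-- ===== PORT A =====
-- first-match lookup in the association list (the convention's reading of `k in d` / `d[k]`)
def pvLookup : List (Int × List Int) → Int → Option (List Int)
  | [], _ => none
  | (k, v) :: rest, x => if k = x then some v else pvLookup rest x

-- the body of A's inner loop for one candidate key: the if / elif / else-pass chain
def pvTryA (ta2sa : List (Int × List Int)) (key : Int) : Option Int :=
  match pvLookup ta2sa key with
  | none => none
  | some l =>
    if l.length = 1 then PySem.List.pyGet? l 0
    else if 1 < l.length then
      let s := PySem.List.sorted l (fun x => x) false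
      -- int(len(_s)/2) = len // 2 since len ≥ 0
      PySem.List.pyGet? s ((s.length / 2 : Nat) : Int)
    else none

-- `for dist in range(1,100): for d in [+1,-1]: …` with early return
def pvLoopA (ta2sa : List (Int × List Int)) (idx : Int) : List Int → Option Int
  | [] => none
  | dist :: rest =>
    match pvTryA ta2sa (idx + dist * 1) with
    | some r => some r
    | none =>
      match pvTryA ta2sa (idx + dist * (-1)) with
      | some r => some r
      | none => pvLoopA ta2sa idx rest

def get_nearest_src_align (ta2sa : List (Int × List Int)) (idx : Int) : Option Int :=
  pvLoopA ta2sa idx (PySem.List.pyRange 1 100 1)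

-- ===== PORT B =====
-- Python tuple `<` on the two-field ranks B compares
def pvCandLt (a b : Int × Int) : Bool :=
  decide (a.1 < b.1) || (decide (a.1 = b.1) && decide (a.2 < b.2))

-- one pass over the items keeping the binding with the minimal (|k-idx|, plus-side-first) rank
def pvBestB (ta2sa : List (Int × List Int)) (idx : Int) : Option ((Int × Int) × List Int) :=
  ta2sa.foldl (fun best kv =>
    if kv.2 = [] then best
    else
      let diff := kv.1 - idx
      let ad := |diff|
      if 1 ≤ ad ∧ ad ≤ 99 then
        let cand := (ad, if 0 < diff then (0 : Int) else 1)
        match best with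
        | none => some (cand, kv.2)
        | some (b, bl) => if pvCandLt cand b then some (cand, kv.2) else some (b, bl)
      else best) none

-- the tail of B after the loop
def pvFinishB : Option ((Int × Int) × List Int) → Option Int
  | none => none
  | some (_, al) =>
    if al.length = 1 then PySem.List.pyGet? al 0
    else
      let s := PySem.List.sorted al (fun x => x) false
      PySem.List.pyGet? s ((s.length / 2 : Nat) : Int)

def get_nearest_src_align_alt (ta2sa : List (Int × List Int)) (idx : Int) : Option Int :=
  pvFinishB (pvBestB ta2sa idx)

-- ===== PRECONDITION & SPEC =====
-- Pre_ excludes (a) inputs on which A's `assert idx not in ta2sa` raises AssertionError, and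
-- (b) association lists with duplicate keys, which never arise from a Python dict and whose
-- first-vs-last-match behaviour is an accidental corner of the encoding.
def Pre_get_nearest_src_align (ta2sa : List (Int × List Int)) (idx : Int) : Prop :=
  (ta2sa.map Prod.fst).Nodup ∧ idx ∉ ta2sa.map Prod.fst
instance (ta2sa : List (Int × List Int)) (idx : Int) : Decidable (Pre_get_nearest_src_align ta2sa idx) := by
  unfold Pre_get_nearest_src_align; infer_instance

def pvWitness_get_nearest_src_align : (List (Int × List Int)) × Int := ([(3, [5]), (7, [1, 2, 9])], 2)

def Spec_get_nearest_src_align (ta2sa : List (Int × List Int)) (idx : Int) (out : Option Int) : Prop := out = get_nearest_src_align_alt ta2sa idx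
instance (ta2sa : List (Int × List Int)) (idx : Int) (out : Option Int) : Decidable (Spec_get_nearest_src_align ta2sa idx out) := by unfold Spec_get_nearest_src_align; infer_instance

-- ===== CLAIM (what is proved, stated in full; the proofs are below) =====
def Claim_equal_get_nearest_src_align : Prop := ∀ (ta2sa : List (Int × List Int)) (idx : Int), Dom_get_nearest_src_align ta2sa idx → Pre_get_nearest_src_align ta2sa idx → Spec_get_nearest_src_align ta2sa idx (get_nearest_src_align ta2sa idx)

-- ===== LEMMAS AND PROOFS =====

-- the rank B assigns to a candidate key
def pvRank (idx k : Int) : Int × Int := (|k - idx|, if 0 < k - idx then 0 else 1)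

-- B's fold step, generalised over the lower distance bound (pvStep 1 is the step of pvBestB)
def pvStep (lo idx : Int) (best : Option ((Int × Int) × List Int)) (kv : Int × List Int) :
    Option ((Int × Int) × List Int) :=
  if kv.2 = [] then best
  else if lo ≤ |kv.1 - idx| ∧ |kv.1 - idx| ≤ 99 then
    match best with
    | none => some (pvRank idx kv.1, kv.2)
    | some (b, bl) => if pvCandLt (pvRank idx kv.1) b then some (pvRank idx kv.1, kv.2)
                      else some (b, bl)
  else best

lemma pvBestB_eq_fold (t : List (Int × List Int)) (idx : Int) :
    pvBestB t idx = t.foldl (pvStep 1 idx) none := by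
  unfold pvBestB pvStep pvRank
  rfl

lemma pvCandLt_false_iff (a b : Int × Int) :
    pvCandLt a b = false ↔ ¬ (a.1 < b.1 ∨ (a.1 = b.1 ∧ a.2 < b.2)) := by
  simp [pvCandLt]

lemma pvCandLt_trichotomy (a b : Int × Int) (h : pvCandLt a b = false) (hne : a ≠ b) :
    pvCandLt b a = true := by
  obtain ⟨a1, a2⟩ := a; obtain ⟨b1, b2⟩ := b
  simp [pvCandLt, Prod.ext_iff] at *
  omega

lemma pvLookup_mem {t : List (Int × List Int)} {k : Int} {v : List Int}
    (h : pvLookup t k = some v) : (k, v) ∈ t := by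
  induction t with
  | nil => simp [pvLookup] at h
  | cons p rest ih =>
    obtain ⟨k', v'⟩ := p
    by_cases hk : k' = k
    · subst hk
      simp [pvLookup] at h
      simp [h]
    · simp [pvLookup, hk] at h
      exact List.mem_cons_of_mem _ (ih h)

lemma pvLookup_of_mem {t : List (Int × List Int)} {kv : Int × List Int}
    (hnd : (t.map Prod.fst).Nodup) (h : kv ∈ t) : pvLookup t kv.1 = some kv.2 := by
  induction t with
  | nil => simp at h
  | cons p rest ih =>
    obtain ⟨k', v'⟩ := p
    simp only [List.map_cons, List.nodup_cons] at hnd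
    rcases List.mem_cons.mp h with h | h
    · subst h; simp [pvLookup]
    · have hk : k' ≠ kv.1 := by
        intro he
        exact hnd.1 (he ▸ (List.mem_map.mpr ⟨kv, h, rfl⟩))
      simp only [pvLookup, if_neg hk]
      exact ih hnd.2 h

-- A's per-key probe yields nothing exactly on an absent key or an empty alignment list
lemma pvTryA_none_of_absent {t : List (Int × List Int)} {key : Int}
    (h : pvLookup t key = none) : pvTryA t key = none := by
  simp [pvTryA, h]

lemma pvTryA_none_of_empty {t : List (Int × List Int)} {key : Int}
    (h : pvLookup t key = some []) : pvTryA t key = none := by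
  simp [pvTryA, h]

-- on a nonempty list A's three-branch extraction equals B's two-branch extraction (any rank c)
lemma pvTryA_eq_finish {t : List (Int × List Int)} {key : Int} {l : List Int}
    (hl : pvLookup t key = some l) (hne : l ≠ []) (c : Int × Int) :
    pvTryA t key = pvFinishB (some (c, l)) := by
  have hlen : 0 < l.length := List.length_pos_of_ne_nil hne
  simp only [pvTryA, hl, pvFinishB]
  by_cases h1 : l.length = 1
  · simp [h1]
  · have h2 : 1 < l.length := by omega
    simp [h1, h2]

lemma pvFinishB_isSome {l : List Int} (hne : l ≠ []) (c : Int × Int) :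
    ∃ r, pvFinishB (some (c, l)) = some r := by
  have hlen : 0 < l.length := List.length_pos_of_ne_nil hne
  simp only [pvFinishB]
  by_cases h1 : l.length = 1
  · simp only [h1, if_true]
    have h0 : (0 : Int) = ((0 : Nat) : Int) := rfl
    rw [h0, PySem.List.pyGet?_natCast]
    exact ⟨l[0], by simp [List.getElem?_eq_getElem (by omega)]⟩
  · simp only [h1, if_false]
    set s := PySem.List.sorted l (fun x => x) false with hs
    have hsl : s.length = l.length := PySem.List.length_sorted ..
    have hd : s.length / 2 < s.length := Nat.div_lt_self (by omega) (by omega)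
    rw [PySem.List.pyGet?_natCast]
    exact ⟨s[s.length / 2], by simp [List.getElem?_eq_getElem hd]⟩

-- ----- fold characterisation -----

lemma fold_none {t : List (Int × List Int)} {lo idx : Int}
    (h : ∀ kv ∈ t, kv.2 ≠ [] → ¬ (lo ≤ |kv.1 - idx| ∧ |kv.1 - idx| ≤ 99)) :
    t.foldl (pvStep lo idx) none = none := by
  induction t with
  | nil => rfl
  | cons kv rest ih =>
    have hstep : pvStep lo idx none kv = none := by
      by_cases he : kv.2 = []
      · simp [pvStep, he]
      · simp [pvStep, he, h kv (by simp) he]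
    simp only [List.foldl_cons, hstep]
    exact ih (fun kv h1 h2 => h kv (List.mem_cons_of_mem _ h1) h2)

lemma fold_aux {lo idx k₀ : Int} {l₀ : List Int} :
    ∀ (t : List (Int × List Int)) (acc : Option ((Int × Int) × List Int)),
    (∀ kv ∈ t, kv.2 ≠ [] → lo ≤ |kv.1 - idx| → |kv.1 - idx| ≤ 99 →
        pvCandLt (pvRank idx kv.1) (pvRank idx k₀) = false ∧
        (pvRank idx kv.1 = pvRank idx k₀ → kv.2 = l₀)) →
    (acc = some (pvRank idx k₀, l₀) ∨
      ((k₀, l₀) ∈ t ∧ l₀ ≠ [] ∧ lo ≤ |k₀ - idx| ∧ |k₀ - idx| ≤ 99 ∧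
        (acc = none ∨ ∃ c l, acc = some (c, l) ∧ pvCandLt (pvRank idx k₀) c = true))) →
    t.foldl (pvStep lo idx) acc = some (pvRank idx k₀, l₀) := by
  intro t
  induction t with
  | nil =>
    intro acc _ hacc
    rcases hacc with h | ⟨h, _⟩
    · simpa using h
    · simp at h
  | cons kv rest ih =>
    intro acc hmin hacc
    simp only [List.foldl_cons]
    refine ih _ (fun kv h1 => hmin kv (List.mem_cons_of_mem _ h1)) ?_
    by_cases he : kv.2 = []
    · -- step skips kv
      have hstep : pvStep lo idx acc kv = acc := by simp [pvStep, he]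
      rw [hstep]
      rcases hacc with h | ⟨hm, hrest⟩
      · exact Or.inl h
      · refine Or.inr ⟨?_, hrest⟩
        rcases List.mem_cons.mp hm with h | h
        · exact absurd (congrArg Prod.snd h).symm (by simpa [he] using hrest.1)
        · exact h
    · by_cases hq : lo ≤ |kv.1 - idx| ∧ |kv.1 - idx| ≤ 99
      · -- kv qualifies
        obtain ⟨hlt, heq⟩ := hmin kv (by simp) he hq.1 hq.2
        rcases hacc with h | ⟨hm, hne₀, hlo₀, hhi₀, hsub⟩
        · -- the accumulator already holds the target: kv cannot beat it
          rw [h]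
          have hstep : pvStep lo idx (some (pvRank idx k₀, l₀)) kv =
              if pvCandLt (pvRank idx kv.1) (pvRank idx k₀) then some (pvRank idx kv.1, kv.2)
              else some (pvRank idx k₀, l₀) := by
            simp [pvStep, he, hq]
          rw [hstep, if_neg (by simp [hlt])]
          exact Or.inl rfl
        · have hm' : kv ≠ (k₀, l₀) → (k₀, l₀) ∈ rest := by
            intro hkv
            rcases List.mem_cons.mp hm with h | h
            · exact absurd h.symm hkv
            · exact h
          rcases hsub with h | ⟨c, l, hc, hcl⟩
          · -- empty accumulator: kv moves in
            rw [h]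
            have hstep : pvStep lo idx none kv = some (pvRank idx kv.1, kv.2) := by
              simp [pvStep, he, hq]
            rw [hstep]
            by_cases hr : pvRank idx kv.1 = pvRank idx k₀
            · exact Or.inl (by rw [hr, heq hr])
            · refine Or.inr ⟨hm' (fun h => hr (by rw [h])), hne₀, hlo₀, hhi₀, ?_⟩
              exact Or.inr ⟨_, _, rfl, pvCandLt_trichotomy _ _ hlt hr⟩
          · -- accumulator beaten by the target rank
            rw [hc]
            have hstep : pvStep lo idx (some (c, l)) kv =
                if pvCandLt (pvRank idx kv.1) c then some (pvRank idx kv.1, kv.2)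
                else some (c, l) := by
              simp [pvStep, he, hq]
            rw [hstep]
            by_cases hr : pvRank idx kv.1 = pvRank idx k₀
            · have hlt2 : pvCandLt (pvRank idx kv.1) c = true := by rw [hr]; exact hcl
              rw [if_pos hlt2]
              exact Or.inl (by rw [hr, heq hr])
            · have hgt := pvCandLt_trichotomy _ _ hlt hr
              by_cases hlt2 : pvCandLt (pvRank idx kv.1) c = true
              · rw [if_pos hlt2]
                refine Or.inr ⟨hm' (fun h => hr (by rw [h])), hne₀, hlo₀, hhi₀, ?_⟩
                exact Or.inr ⟨_, _, rfl, hgt⟩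
              · rw [if_neg hlt2]
                refine Or.inr ⟨hm' (fun h => hr (by rw [h])), hne₀, hlo₀, hhi₀, ?_⟩
                exact Or.inr ⟨_, _, rfl, hcl⟩
      · -- kv out of the distance window
        have hstep : pvStep lo idx acc kv = acc := by simp [pvStep, he, hq]
        rw [hstep]
        rcases hacc with h | ⟨hm, hne₀, hlo₀, hhi₀, hsub⟩
        · exact Or.inl h
        · have hm' : (k₀, l₀) ∈ rest := by
            rcases List.mem_cons.mp hm with h | h
            · refine absurd ⟨?_, ?_⟩ hq
              · rw [← h]; exact hlo₀
              · rw [← h]; exact hhi₀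
            · exact h
          exact Or.inr ⟨hm', hne₀, hlo₀, hhi₀, hsub⟩

lemma fold_eq_some {lo idx k₀ : Int} {l₀ : List Int} {t : List (Int × List Int)}
    (hm : (k₀, l₀) ∈ t) (hne : l₀ ≠ []) (hlo : lo ≤ |k₀ - idx|) (hhi : |k₀ - idx| ≤ 99)
    (hmin : ∀ kv ∈ t, kv.2 ≠ [] → lo ≤ |kv.1 - idx| → |kv.1 - idx| ≤ 99 →
        pvCandLt (pvRank idx kv.1) (pvRank idx k₀) = false ∧
        (pvRank idx kv.1 = pvRank idx k₀ → kv.2 = l₀)) :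
    t.foldl (pvStep lo idx) none = some (pvRank idx k₀, l₀) :=
  fold_aux t none hmin (Or.inr ⟨hm, hne, hlo, hhi, Or.inl rfl⟩)

-- raising the lower bound past a distance no qualifying key has does not change the fold
lemma fold_succ {t : List (Int × List Int)} {n idx : Int}
    (h : ∀ kv ∈ t, kv.2 ≠ [] → |kv.1 - idx| ≠ n) :
    t.foldl (pvStep n idx) none = t.foldl (pvStep (n + 1) idx) none := by
  suffices H : ∀ acc, t.foldl (pvStep n idx) acc = t.foldl (pvStep (n + 1) idx) acc from H none
  induction t with
  | nil => intro acc; rfl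
  | cons kv rest ih =>
    intro acc
    have hstep : pvStep n idx acc kv = pvStep (n + 1) idx acc kv := by
      by_cases he : kv.2 = []
      · simp [pvStep, he]
      · have hne := h kv (by simp) he
        by_cases hq : n ≤ |kv.1 - idx| ∧ |kv.1 - idx| ≤ 99
        · have hq' : n + 1 ≤ |kv.1 - idx| ∧ |kv.1 - idx| ≤ 99 := ⟨by omega, hq.2⟩
          simp only [pvStep, if_neg he, if_pos hq, if_pos hq']
        · have hq' : ¬ (n + 1 ≤ |kv.1 - idx| ∧ |kv.1 - idx| ≤ 99) := by omega
          simp only [pvStep, if_neg he, if_neg hq, if_neg hq']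
    simp only [List.foldl_cons, hstep]
    exact ih (fun kv h1 => h kv (List.mem_cons_of_mem _ h1)) _

-- ----- the main induction: the remaining probe loop equals the fold restricted to distance ≥ n -----

lemma pv_main {t : List (Int × List Int)} {idx : Int}
    (hnd : (t.map Prod.fst).Nodup) :
    ∀ m : Nat, m ≤ 99 →
      pvLoopA t idx (PySem.List.pyRange (100 - (m : Int)) 100 1) =
        pvFinishB (t.foldl (pvStep (100 - (m : Int)) idx) none) := by
  intro m
  induction m with
  | zero =>
    intro _
    rw [PySem.List.pyRange_one_eq_nil (by norm_num)]
    rw [fold_none (by intro kv _ _ hc; omega)]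
    rfl
  | succ m ih =>
    intro hm
    have hcast : (((m + 1 : Nat)) : Int) = (m : Int) + 1 := by push_cast; ring
    rw [hcast]
    set n : Int := 100 - ((m : Int) + 1) with hn
    have hn1 : 1 ≤ n := by omega
    have hn99 : n ≤ 99 := by omega
    rw [PySem.List.pyRange_one_cons (by omega)]
    have hrange : n + 1 = 100 - (m : Int) := by omega
    have habs_p : |(idx + n) - idx| = n := by
      rw [show (idx + n) - idx = n by ring]; exact abs_of_pos (by omega)
    have habs_m : |(idx - n) - idx| = n := by
      rw [show (idx - n) - idx = -n by ring, abs_neg]; exact abs_of_pos (by omega)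
    have hrank_p : pvRank idx (idx + n) = (n, 0) := by
      simp only [pvRank, habs_p]
      rw [if_pos (by omega)]
    have hrank_m : pvRank idx (idx - n) = (n, 1) := by
      simp only [pvRank, habs_m]
      rw [if_neg (by omega)]
    simp only [pvLoopA]
    rw [show idx + n * 1 = idx + n by ring, show idx + n * (-1) = idx - n by ring]
    -- the whole minus-side analysis, under the facts the plus side leaves behind
    have hM : ∀ _hplus_none : pvTryA t (idx + n) = none,
        (∀ kv ∈ t, kv.2 ≠ [] → kv.1 ≠ idx + n) →
        (match pvTryA t (idx - n) with
         | some r => some r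
         | none => pvLoopA t idx (PySem.List.pyRange (n + 1) 100 1)) =
          pvFinishB (t.foldl (pvStep n idx) none) := by
      intro _ hnoplus
      rcases hminus : pvLookup t (idx - n) with _ | lm
      · -- minus absent: nothing at distance n at all
        rw [pvTryA_none_of_absent hminus]
        have hnominus : ∀ kv ∈ t, kv.2 ≠ [] → kv.1 ≠ idx - n := by
          intro kv hkv hne he
          have hl := pvLookup_of_mem hnd hkv
          rw [he, hminus] at hl
          simp at hl
        rw [fold_succ (by
          intro kv hkv hne habs
          rcases abs_cases (kv.1 - idx) with ⟨ha, _⟩ | ⟨ha, _⟩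
          · exact hnoplus kv hkv hne (by omega)
          · exact hnominus kv hkv hne (by omega))]
        rw [hrange]
        exact ih (by omega)
      · by_cases hlme : lm = []
        · -- minus present but empty
          subst hlme
          rw [pvTryA_none_of_empty hminus]
          have hnominus : ∀ kv ∈ t, kv.2 ≠ [] → kv.1 ≠ idx - n := by
            intro kv hkv hne he
            have hl := pvLookup_of_mem hnd hkv
            rw [he, hminus] at hl
            exact hne (Option.some.inj hl).symm
          rw [fold_succ (by
            intro kv hkv hne habs
            rcases abs_cases (kv.1 - idx) with ⟨ha, _⟩ | ⟨ha, _⟩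
            · exact hnoplus kv hkv hne (by omega)
            · exact hnominus kv hkv hne (by omega))]
          rw [hrange]
          exact ih (by omega)
        · -- minus present and nonempty: it is the unique nearest qualifying key
          rw [pvTryA_eq_finish hminus hlme (pvRank idx (idx - n))]
          obtain ⟨r, hr⟩ := pvFinishB_isSome hlme (pvRank idx (idx - n))
          rw [hr]
          rw [fold_eq_some (pvLookup_mem hminus) hlme (by omega) (by omega) ?_]
          · exact hr.symm
          · intro kv hkv hne hlo hhi
            rw [hrank_m]
            have hknp := hnoplus kv hkv hne
            constructor
            · rw [pvCandLt_false_iff]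
              simp only [pvRank]
              intro hcon
              rcases hcon with hc | ⟨hc1, hc2⟩
              · omega
              · -- same distance n, plus side preferred: that key is idx + n, excluded
                by_cases hz : 0 < kv.1 - idx
                · apply hknp
                  rcases abs_cases (kv.1 - idx) with ⟨ha, _⟩ | ⟨ha, _⟩ <;> omega
                · rw [if_neg hz] at hc2; omega
            · intro hr2
              simp only [pvRank, Prod.mk.injEq] at hr2
              obtain ⟨h1, h2⟩ := hr2
              have h3 : ¬ 0 < kv.1 - idx := by
                by_contra hc; rw [if_pos hc] at h2; omega
              have hk1 : kv.1 = idx - n := by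
                rcases abs_cases (kv.1 - idx) with ⟨ha, _⟩ | ⟨ha, _⟩ <;> omega
              have hl := pvLookup_of_mem hnd hkv
              rw [hk1, hminus] at hl
              exact (Option.some.inj hl).symm
    rcases hplus : pvLookup t (idx + n) with _ | lp
    · -- plus absent
      rw [pvTryA_none_of_absent hplus]
      refine hM (pvTryA_none_of_absent hplus) ?_
      intro kv hkv hne he
      have hl := pvLookup_of_mem hnd hkv
      rw [he, hplus] at hl
      simp at hl
    · by_cases hlpe : lp = []
      · -- plus present but empty
        subst hlpe
        rw [pvTryA_none_of_empty hplus]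
        refine hM (pvTryA_none_of_empty hplus) ?_
        intro kv hkv hne he
        have hl := pvLookup_of_mem hnd hkv
        rw [he, hplus] at hl
        exact hne (Option.some.inj hl).symm
      · -- plus present and nonempty: it is the unique nearest qualifying key
        rw [pvTryA_eq_finish hplus hlpe (pvRank idx (idx + n))]
        obtain ⟨r, hr⟩ := pvFinishB_isSome hlpe (pvRank idx (idx + n))
        rw [hr]
        rw [fold_eq_some (pvLookup_mem hplus) hlpe (by omega) (by omega) ?_]
        · exact hr.symm
        · intro kv hkv hne hlo hhi
          rw [hrank_p]
          constructor
          · rw [pvCandLt_false_iff]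
            simp only [pvRank]
            intro hcon
            rcases hcon with hc | ⟨hc1, hc2⟩
            · omega
            · split at hc2 <;> omega
          · intro hr2
            simp only [pvRank, Prod.mk.injEq] at hr2
            obtain ⟨h1, h2⟩ := hr2
            have h3 : 0 < kv.1 - idx := by
              by_contra hc; rw [if_neg hc] at h2; omega
            have hk1 : kv.1 = idx + n := by
              rcases abs_cases (kv.1 - idx) with ⟨ha, _⟩ | ⟨ha, _⟩ <;> omega
            have hl := pvLookup_of_mem hnd hkv
            rw [hk1, hplus] at hl
            exact (Option.some.inj hl).symm

-- ===== VERDICT (by name: the statement is the Claim_ definition above) =====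
theorem get_nearest_src_align_spec : Claim_equal_get_nearest_src_align := by
  intro t idx _hdom hpre
  unfold Spec_get_nearest_src_align
  unfold get_nearest_src_align get_nearest_src_align_alt
  rw [pvBestB_eq_fold]
  have h := pv_main (t := t) (idx := idx) hpre.1 99 (by norm_num)
  norm_num at h
  exact h
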